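-- pv_equiv track=rewrite | github.com/gridvisi/Python_workspace | 4 ddm_course/loop循环/6 kyu Loneliest character.py | loneliest
-- ===== SOURCE A (Python) =====
-- def loneliest(strng):
--     spaces = 0
--     character = ''
--     result = {}
--     for c in strng.strip():
--         if c == ' ':
--             spaces += 1
--         else:
--             if character: result[character] += spaces
--             character = c
--             result[character] = spaces
--             spaces = 0
--
--     max_spaces = max(result.values())
--     return list(filter(lambda c: result[c] == max_spaces, result.keys()))
-- ===== SOURCE B (Python) =====
-- def loneliest(strng):
--     s = strng.strip()
--     occ = []          # (character, number of spaces immediately before it), one entry per occurrence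
--     run = 0
--     for c in s:
--         if c == ' ':
--             run += 1
--         else:
--             occ.append((c, run))
--             run = 0
--     gaps = [p for _, p in occ[1:]] + [0]   # spaces immediately after each occurrence
--     result = {}
--     for (c, pre), nxt in zip(occ, gaps):
--         result[c] = pre + nxt              # later occurrences overwrite earlier ones
--     m = max(result.values())
--     return [c for c in result if result[c] == m]
-- ===== Notes on version B (the rewrite author's own statement) =====
-- stated objective: alternative
-- what changed: Replaces A's single online loop that back-patches the previous character's dict entry with += by a two-phase pipeline: one scan collects (char, preceding-gap) occurrences, then each occurrence is paired with the following gap by zipping with the shifted gap list and its total is inserted directly (no mutation of earlier entries).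
import Mathlib
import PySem

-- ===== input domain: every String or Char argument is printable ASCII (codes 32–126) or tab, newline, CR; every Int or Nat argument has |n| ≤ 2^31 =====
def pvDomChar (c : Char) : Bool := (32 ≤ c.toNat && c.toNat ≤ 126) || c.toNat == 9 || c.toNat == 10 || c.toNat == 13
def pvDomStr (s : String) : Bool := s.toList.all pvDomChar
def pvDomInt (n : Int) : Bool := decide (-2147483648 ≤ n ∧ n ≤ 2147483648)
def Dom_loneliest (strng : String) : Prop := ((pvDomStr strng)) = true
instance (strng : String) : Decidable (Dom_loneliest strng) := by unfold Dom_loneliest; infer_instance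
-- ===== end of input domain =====

-- B replaces A's online dict back-patching (+=) by a two-phase occurrence/gap pipeline; objective: alternative decomposition, same cost.

-- ===== PORT A =====
-- A's for-loop over strng.strip() as structural recursion over the same state (spaces, character, result).
def pvLoopA : List Char → Int → Option Char → PySem.Dict Char Int → PySem.Dict Char Int
  | [], _spaces, _character, result => result
  | c :: rest, spaces, character, result =>
    if c = ' ' then pvLoopA rest (spaces + 1) character result
    else
      pvLoopA rest 0 (some c)
        ((match character with
          | some ch => result.modify ch 0 (· + spaces)   -- result[character] += spaces (key always present here)
          | none => result).insert c spaces)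

def loneliest (strng : String) : List String :=
  let result := pvLoopA (PySem.Str.strip strng).toList 0 none PySem.Dict.empty
  let maxSpaces := (PySem.List.max? result.values (fun v => v)).getD 0
  (result.keys.filter (fun c => PySem.Dict.getD result c 0 == maxSpaces)).map (fun c => String.ofList [c])

-- ===== PORT B =====
-- first loop of Source B: collect (character, spaces immediately before it) per occurrence
def pvOcc : List Char → Int → List (Char × Int)
  | [], _run => []
  | c :: rest, run => if c = ' ' then pvOcc rest (run + 1) else (c, run) :: pvOcc rest 0

def loneliest_alt (strng : String) : List String :=
  let occ := pvOcc (PySem.Str.strip strng).toList 0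
  let gaps := (occ.drop 1).map Prod.snd ++ [0]
  let result := (occ.zip gaps).foldl (fun d p => d.insert p.1.1 (p.1.2 + p.2)) PySem.Dict.empty
  let m := (PySem.List.max? result.values (fun v => v)).getD 0
  (result.keys.filter (fun c => PySem.Dict.getD result c 0 == m)).map (fun c => String.ofList [c])

-- ===== PRECONDITION & SPEC =====
-- Pre_ excludes exactly the inputs whose strip() is empty: there Python A (and B) raise ValueError on max([]).
def Pre_loneliest (strng : String) : Prop := PySem.Str.strip strng ≠ ""
instance (strng : String) : Decidable (Pre_loneliest strng) := by unfold Pre_loneliest; infer_instance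
def pvWitness_loneliest : String := "a  b c"

def Spec_loneliest (strng : String) (out : List String) : Prop := out = loneliest_alt strng
instance (strng : String) (out : List String) : Decidable (Spec_loneliest strng out) := by unfold Spec_loneliest; infer_instance

-- ===== CLAIM (what is proved, stated in full; the proofs are below) =====
def Claim_equal_loneliest : Prop := ∀ (strng : String), Dom_loneliest strng → Pre_loneliest strng → Spec_loneliest strng (loneliest strng)

-- ===== LEMMAS AND PROOFS =====
-- common characterization: each occurrence's final value is its own gap plus the next occurrence's gap (the last gets only its own)
def pvTot : List (Char × Int) → PySem.Dict Char Int → PySem.Dict Char Int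
  | [], d => d
  | [(c, p)], d => d.insert c p
  | (c, p) :: (c', p') :: rest, d => pvTot ((c', p') :: rest) (d.insert c (p + p'))

lemma pv_modify_insert (d : PySem.Dict Char Int) (c : Char) (v w : Int) :
    (d.insert c v).modify c 0 (· + w) = d.insert c (v + w) := by
  simp [PySem.Dict.modify, PySem.Dict.getD_insert_self, PySem.Dict.insert_insert_self]

lemma pvLoopA_some (t : List Char) :
    ∀ (r : Int) (c : Char) (v : Int) (d : PySem.Dict Char Int),
      pvLoopA t r (some c) (d.insert c v) = pvTot ((c, v) :: pvOcc t r) d := by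
  induction t with
  | nil => intro r c v d; simp [pvLoopA, pvOcc, pvTot]
  | cons x rest ih =>
    intro r c v d
    by_cases hx : x = ' '
    · simp [pvLoopA, pvOcc, hx, ih]
    · simp only [pvLoopA, pvOcc, if_neg hx, pv_modify_insert, ih, pvTot]

lemma pvLoopA_none (t : List Char) :
    ∀ (r : Int) (d : PySem.Dict Char Int),
      pvLoopA t r none d = pvTot (pvOcc t r) d := by
  induction t with
  | nil => intro r d; simp [pvLoopA, pvOcc, pvTot]
  | cons x rest ih =>
    intro r d
    by_cases hx : x = ' '
    · simp [pvLoopA, pvOcc, hx, ih]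
    · simp only [pvLoopA, pvOcc, if_neg hx, pvLoopA_some]

lemma pvFoldB (occ : List (Char × Int)) :
    ∀ (d : PySem.Dict Char Int),
      (occ.zip ((occ.drop 1).map Prod.snd ++ [0])).foldl (fun d p => d.insert p.1.1 (p.1.2 + p.2)) d
        = pvTot occ d := by
  induction occ with
  | nil => intro d; simp [pvTot]
  | cons x rest ih =>
    intro d
    match rest, ih with
    | [], _ => simp [pvTot]
    | y :: rest', ih =>
      have h := ih (d.insert x.1 (x.2 + y.2))
      simp only [List.zip, List.drop, List.map_cons] at h ⊢
      simpa [pvTot] using h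

-- ===== VERDICT (by name: the statement is the Claim_ definition above) =====
theorem loneliest_spec : Claim_equal_loneliest := by
  intro strng _ _
  unfold Spec_loneliest
  simp only [loneliest, loneliest_alt, pvLoopA_none, pvFoldB]
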